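-- pv_equiv track=rewrite | github.com/qwl2333/leetcode-py3 | Companies/Roblox/subsets.py | subsets_no_neighbor
-- ===== SOURCE A (Python) =====
-- def subsets_no_neighbor(nums: list[int]) -> list[list[int]]:
--     n = len(nums)
--     path = []
--     res = []
--     def dfs_helper(i: int):
--         if i == n:
--             res.append(list(path))
--             return
--
--         res.append(list(path))
--         for i in range(i, n):
--             path.append(nums[i])
--             dfs_helper(i + 2)
--             path.pop()
--
--     dfs_helper(0)
--     return res
-- ===== SOURCE B (Python) =====
-- def subsets_no_neighbor(nums: list[int]) -> list[list[int]]: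
--     n = len(nums)
--
--     def gen(i: int) -> list[list[int]]:
--         # all valid no-adjacent-index subsets using indices >= i, empty first,
--         # then start indices j in increasing order
--         return [[]] + [[nums[j]] + rest
--                        for j in range(i, n)
--                        for rest in gen(j + 2)]
--
--     return gen(0)
-- ===== Notes on version B (the rewrite author's own statement) =====
-- stated objective: simpler
-- what changed: Replaced the side-effecting DFS that mutates a shared path/res pair with a pure return-value recursion gen(i) that returns all valid subsets over indices >= i: the empty subset first, then for each start index j in ascending order nums[j] prepended to every subset of gen(j+2).
import Mathlib
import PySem

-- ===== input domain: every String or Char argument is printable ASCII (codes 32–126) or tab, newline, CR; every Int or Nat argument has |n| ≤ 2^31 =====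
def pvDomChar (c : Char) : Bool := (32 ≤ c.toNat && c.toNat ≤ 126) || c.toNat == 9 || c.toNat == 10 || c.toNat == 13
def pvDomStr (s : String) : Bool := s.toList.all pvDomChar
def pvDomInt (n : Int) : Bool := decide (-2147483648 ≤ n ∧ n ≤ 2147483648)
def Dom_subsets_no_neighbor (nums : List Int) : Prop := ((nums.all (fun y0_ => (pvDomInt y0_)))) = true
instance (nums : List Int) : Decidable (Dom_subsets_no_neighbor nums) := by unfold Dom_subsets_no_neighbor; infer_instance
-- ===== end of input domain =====

-- B replaces A's shared-state DFS (mutated path/res) by a pure recursion returning fresh lists; objective: simpler.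

-- ===== PORT A =====
-- dfs_helper, with the mutable `path`/`res` threaded as explicit state.
-- The Nat `fuel` only makes the recursion structural (each call starts at i+2,
-- so fuel = nums.length + 1 is never exhausted); it changes no computed value.
def pvDfsA (nums : List Int) (n : Int) : Nat → Int → List Int → List (List Int) → List (List Int)
  | 0, _, _, res => res
  | fuel + 1, i, path, res =>
    if i = n then res ++ [path]
    else
      (PySem.List.pyRange i n 1).foldl
        (fun r j =>
          -- path.append(nums[i]); dfs_helper(i+2); path.pop()
          pvDfsA nums n fuel (j + 2) (path ++ [PySem.List.pyGetD nums j 0]) r)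
        (res ++ [path])

def subsets_no_neighbor (nums : List Int) : List (List Int) :=
  pvDfsA nums nums.length (nums.length + 1) 0 [] []

-- ===== PORT B =====
-- gen(i) = [[]] + [[nums[j]] + rest for j in range(i, n) for rest in gen(j+2)]
-- Same fuel device for structural recursion; fuel = nums.length + 1 suffices.
def pvGenB (nums : List Int) : Nat → Nat → List (List Int)
  | 0, _ => [[]]
  | fuel + 1, i =>
    [] :: (List.range' i (nums.length - i)).flatMap
      (fun j => (pvGenB nums fuel (j + 2)).map (fun rest => nums.getD j 0 :: rest))

def subsets_no_neighbor_alt (nums : List Int) : List (List Int) :=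
  pvGenB nums (nums.length + 1) 0

-- ===== PRECONDITION & SPEC =====
def Spec_subsets_no_neighbor (nums : List Int) (out : List (List Int)) : Prop := out = subsets_no_neighbor_alt nums
instance (nums : List Int) (out : List (List Int)) : Decidable (Spec_subsets_no_neighbor nums out) := by unfold Spec_subsets_no_neighbor; infer_instance

-- ===== CLAIM (what is proved, stated in full; the proofs are below) =====
def Claim_equal_subsets_no_neighbor : Prop := ∀ (nums : List Int), Dom_subsets_no_neighbor nums → Spec_subsets_no_neighbor nums (subsets_no_neighbor nums)

-- ===== LEMMAS AND PROOFS =====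

-- a foldl whose step only appends a per-element block is an append of a flatMap
lemma pv_foldl_step_append {α β : Type} (js : List α) (F : List β → α → List β)
    (g : α → List β) (h : ∀ j ∈ js, ∀ acc, F acc j = acc ++ g j) :
    ∀ acc, js.foldl F acc = acc ++ js.flatMap g := by
  induction js with
  | nil => simp
  | cons x xs ih =>
    intro acc
    simp only [List.foldl_cons, List.flatMap_cons]
    rw [h x (by simp) acc, ih (fun j hj => h j (by simp [hj])), List.append_assoc]

-- with enough fuel on both sides, the DFS appends to res exactly gen(i) with path prepended
lemma pvDfsA_eq (nums : List Int) :
    ∀ (fa : Nat) (i : Int), 0 ≤ i → i ≤ (nums.length : Int) + 1 →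
      (nums.length : Int) + 2 ≤ i + 2 * fa →
    ∀ (fb : Nat), (nums.length : Int) + 2 ≤ i + 2 * fb →
    ∀ (path : List Int) (res : List (List Int)),
      pvDfsA nums nums.length fa i path res
        = res ++ (pvGenB nums fb i.toNat).map (fun s => path ++ s) := by
  intro fa
  induction fa with
  | zero => intro i hi hi' hfa; omega
  | succ fa ih =>
    intro i hi hi' hfa fb hfb path res
    obtain ⟨fb', rfl⟩ : ∃ fb', fb = fb' + 1 := ⟨fb - 1, by omega⟩
    by_cases hlt : i < (nums.length : Int)
    · -- recursive case
      rw [pvDfsA]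
      rw [if_neg (by omega)]
      rw [pv_foldl_step_append _ _
        (fun j => (pvGenB nums fb' (j.toNat + 2)).map
          (fun s => path ++ (PySem.List.pyGetD nums j 0 :: s)))
        (by
          intro j hj acc
          have hm := (PySem.List.mem_pyRange_one).mp hj
          rw [ih (j + 2) (by omega) (by omega) (by omega) fb' (by omega)]
          congr 1
          have : (j + 2).toNat = j.toNat + 2 := by omega
          rw [this]
          simp)]
      rw [pvGenB]
      simp only [List.map_cons, List.map_flatMap, List.map_map]
      rw [PySem.List.pyRange_one]
      have hlen : ((nums.length : Int) - i).toNat = nums.length - i.toNat := by omega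
      have hr' : List.range' i.toNat (nums.length - i.toNat)
          = (List.range (nums.length - i.toNat)).map (fun k => i.toNat + k) := by
        rw [List.range'_eq_map_range]
      rw [hr', ← hlen]
      simp only [List.flatMap_map]
      rw [List.append_assoc, List.append_nil, List.singleton_append]
      congr 2
      apply List.flatMap_congr
      intro x hx
      have hx' : x < ((nums.length : Int) - i).toNat := List.mem_range.mp hx
      have h1 : (i + (x : Int)).toNat = i.toNat + x := by omega
      have h2 : PySem.List.pyGetD nums (i + (x : Int)) 0 = nums.getD (i.toNat + x) 0 := by
        have : (i + (x : Int)) = ((i.toNat + x : Nat) : Int) := by omega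
        rw [this, PySem.List.pyGetD_natCast]
      rw [h1, h2]
      simp [List.getD, Function.comp]
    · -- i ≥ n: both loops are empty, result is res ++ [path]
      have hgen : pvGenB nums (fb' + 1) i.toNat = [[]] := by
        rw [pvGenB]
        have : nums.length - i.toNat = 0 := by omega
        simp [this]
      rw [hgen, pvDfsA]
      by_cases he : i = (nums.length : Int)
      · rw [if_pos he]; simp
      · rw [if_neg he, PySem.List.pyRange_one_eq_nil (by omega)]
        simp

-- ===== VERDICT (by name: the statement is the Claim_ definition above) =====
theorem subsets_no_neighbor_spec : Claim_equal_subsets_no_neighbor := by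
  intro nums _
  unfold Spec_subsets_no_neighbor subsets_no_neighbor subsets_no_neighbor_alt
  rw [pvDfsA_eq nums (nums.length + 1) 0 (by omega) (by omega) (by push_cast; omega)
      (nums.length + 1) (by push_cast; omega)]
  simp
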